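-- pv_equiv track=rewrite | github.com/titouan-gautier/Polytech | INFO3A - S5/Algo & Prog/TP/tests/tp5/test_btree_class.py | ancestor_idxs
-- ===== SOURCE A (Python) =====
-- def ancestor_idxs(length: int) :
--     ancs: list[list[int]] = [[] for _ in range(length)]
--     for k in reversed(range(length)):
--         i = k
--         while i >= 0:
--             if ancs[i]:
--                 ancs[k] = ancs[i] + ancs[k]
--                 break
--             ancs[k].insert(0, i)
--             i = (i - 2) // 2 if i % 2 == 0 else (i - 1) // 2
--     return ancs
-- ===== SOURCE B (Python) =====
-- def ancestor_idxs(length: int):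
--     # Forward DP: the path for node k is the parent's path plus k itself.
--     ancs: list[list[int]] = []
--     for k in range(length):
--         if k == 0:
--             ancs.append([0])
--         else:
--             ancs.append(ancs[(k - 1) // 2] + [k])
--     return ancs
-- ===== Notes on version B (the rewrite author's own statement) =====
-- stated objective: faster
-- what changed: Replaces the backward per-node climb to the root with repeated insert(0,...) by a forward DP that extends the already-computed parent path with one append per node.
import Mathlib
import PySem

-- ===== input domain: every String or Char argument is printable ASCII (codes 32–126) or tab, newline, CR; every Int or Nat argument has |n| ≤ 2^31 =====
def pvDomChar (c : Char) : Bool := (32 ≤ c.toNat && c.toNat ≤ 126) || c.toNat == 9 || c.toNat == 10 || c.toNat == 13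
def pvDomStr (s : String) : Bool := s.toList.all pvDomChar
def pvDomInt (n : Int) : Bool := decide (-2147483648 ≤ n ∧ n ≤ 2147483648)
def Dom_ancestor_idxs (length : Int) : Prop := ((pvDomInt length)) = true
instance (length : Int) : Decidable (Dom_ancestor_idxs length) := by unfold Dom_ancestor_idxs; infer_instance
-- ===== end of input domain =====

-- B replaces A's backward climb (with insert(0, ...)) by a forward DP reusing the parent's path; faster.

-- ===== PORT A =====
-- the while-loop of A: i descends via the parent map; terminates since the parent of i ≥ 0 is < i and ≥ -1
def ancA_climb (k : Int) (i : Int) (ancs : List (List Int)) : List (List Int) :=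
  if h : 0 ≤ i then
    if PySem.List.pyGetD ancs i [] ≠ [] then      -- if ancs[i]:  (exact: 0 ≤ i ≤ k < len ancs at every call from A)
      PySem.List.pySetD ancs k (PySem.List.pyGetD ancs i [] ++ PySem.List.pyGetD ancs k [])   -- ancs[k] = ancs[i] + ancs[k]; break
    else
      ancA_climb k
        (if PySem.Int.mod i 2 = 0 then PySem.Int.floordiv (i - 2) 2 else PySem.Int.floordiv (i - 1) 2)
        (PySem.List.pySetD ancs k (i :: PySem.List.pyGetD ancs k []))  -- ancs[k].insert(0, i)
  else ancs
termination_by (i + 1).toNat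
decreasing_by
  split_ifs with hpar
  · rw [PySem.Int.floordiv_eq_ediv_of_pos (by omega)]; omega
  · rw [PySem.Int.floordiv_eq_ediv_of_pos (by omega)]; omega

def ancestor_idxs (length : Int) : List (List Int) :=
  (PySem.List.pyRange 0 length 1).reverse.foldl (fun ancs k => ancA_climb k k ancs)
    ((PySem.List.pyRange 0 length 1).map (fun _ => ([] : List Int)))

-- ===== PORT B =====
def ancestor_idxs_alt (length : Int) : List (List Int) :=
  (PySem.List.pyRange 0 length 1).foldl
    (fun ancs k =>
      if k == 0 then ancs ++ [[0]]
      else ancs ++ [PySem.List.pyGetD ancs (PySem.Int.floordiv (k - 1) 2) [] ++ [k]])  -- ancs[(k-1)//2] is in range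
    []

-- ===== PRECONDITION & SPEC =====
def Spec_ancestor_idxs (length : Int) (out : List (List Int)) : Prop := out = ancestor_idxs_alt length
instance (length : Int) (out : List (List Int)) : Decidable (Spec_ancestor_idxs length out) := by unfold Spec_ancestor_idxs; infer_instance

-- ===== CLAIM (what is proved, stated in full; the proofs are below) =====
def Claim_equal_ancestor_idxs : Prop := ∀ (length : Int), Dom_ancestor_idxs length → Spec_ancestor_idxs length (ancestor_idxs length)

-- ===== LEMMAS AND PROOFS =====

-- root-to-j path of heap-indexed node j
def path : Nat → List Int
  | 0 => [0]
  | (n + 1) => path (n / 2) ++ [((n : Int) + 1)]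

-- the chain A's climb builds, expressed with A's own parent map
def chain (i : Int) : List Int :=
  if _h : 0 ≤ i then
    chain (if PySem.Int.mod i 2 = 0 then PySem.Int.floordiv (i - 2) 2 else PySem.Int.floordiv (i - 1) 2) ++ [i]
  else []
termination_by (i + 1).toNat
decreasing_by
  split_ifs with hpar
  · rw [PySem.Int.floordiv_eq_ediv_of_pos (by omega)]; omega
  · rw [PySem.Int.floordiv_eq_ediv_of_pos (by omega)]; omega

theorem chain_neg_one : chain (-1) = [] := by
  rw [chain]; simp

theorem chain_natCast (j : Nat) : chain (j : Int) = path j := by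
  induction j using Nat.strong_induction_on with
  | _ j ih =>
    rw [chain, dif_pos (Int.natCast_nonneg j)]
    match j with
    | 0 =>
      norm_num
      rw [chain_neg_one]
      simp [path]
    | s + 1 =>
      have hm : PySem.Int.mod ((s + 1 : Nat) : Int) 2 = (((s + 1) % 2 : Nat) : Int) := by
        exact_mod_cast PySem.Int.mod_natCast (s + 1) 2
      have hpar : (if PySem.Int.mod ((s + 1 : Nat) : Int) 2 = 0 then
            PySem.Int.floordiv (((s + 1 : Nat) : Int) - 2) 2
          else PySem.Int.floordiv (((s + 1 : Nat) : Int) - 1) 2) = ((s / 2 : Nat) : Int) := by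
        split_ifs with h
        · have hev : (s + 1) % 2 = 0 := by rw [hm] at h; exact_mod_cast h
          rw [show ((s + 1 : Nat) : Int) - 2 = ((s - 1 : Nat) : Int) by omega,
              show PySem.Int.floordiv ((s - 1 : Nat) : Int) 2 = (((s - 1) / 2 : Nat) : Int) from
                by exact_mod_cast PySem.Int.floordiv_natCast (s - 1) 2]
          congr 1; omega
        · rw [show ((s + 1 : Nat) : Int) - 1 = ((s : Nat) : Int) by omega,
              show PySem.Int.floordiv ((s : Nat) : Int) 2 = ((s / 2 : Nat) : Int) from
                by exact_mod_cast PySem.Int.floordiv_natCast s 2]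
      rw [hpar, ih (s / 2) (by omega)]
      simp [path]

-- A's state after having processed all k ≥ m
def stateAt (m n : Nat) : List (List Int) :=
  (List.range n).map (fun j => if j < m then [] else path j)

theorem climb_eq (i k : Int) (ancs : List (List Int)) (hk0 : 0 ≤ k) (hik : i ≤ k)
    (hklen : k.toNat < ancs.length)
    (H : ∀ j : Nat, (j : Int) ≤ i → ancs.getD j [] = []) :
    ancA_climb k i ancs = PySem.List.pySetD ancs k (chain i ++ PySem.List.pyGetD ancs k []) := by
  have main : ∀ N : Nat, ∀ i : Int, ∀ ancs : List (List Int), (i + 1).toNat ≤ N → i ≤ k →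
      k.toNat < ancs.length → (∀ j : Nat, (j : Int) ≤ i → ancs.getD j [] = []) →
      ancA_climb k i ancs = PySem.List.pySetD ancs k (chain i ++ PySem.List.pyGetD ancs k []) := by
    intro N
    induction N with
    | zero =>
      intro i ancs hN hik hklen H
      have hi : ¬ 0 ≤ i := by omega
      rw [ancA_climb, dif_neg hi, chain, dif_neg hi, List.nil_append,
          PySem.List.pyGetD_eq_getElem ancs [] hk0 (by omega),
          PySem.List.pySetD_of_nonneg ancs _ hk0,
          List.set_getElem_self hklen]
    | succ M IH =>
      intro i ancs hN hik hklen H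
      by_cases hi : 0 ≤ i
      · -- ancs[i] = []
        have hilen : i.toNat < ancs.length := by omega
        have hrow : PySem.List.pyGetD ancs i [] = [] := by
          rw [PySem.List.pyGetD_eq_getElem ancs [] hi (by omega),
              ← List.getD_eq_getElem ancs [] hilen]
          exact H i.toNat (by omega)
        rw [ancA_climb, dif_pos hi, if_neg (by simp [hrow])]
        -- the new parent index
        set p : Int := if PySem.Int.mod i 2 = 0 then PySem.Int.floordiv (i - 2) 2
            else PySem.Int.floordiv (i - 1) 2 with hp
        have hpb : -1 ≤ p ∧ p < i := by
          rw [hp]; split_ifs <;>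
            (rw [PySem.Int.floordiv_eq_ediv_of_pos (by omega)]; omega)
        have hkk : k.toNat ≠ (Int.toNat k) + 1 := by omega
        set old := PySem.List.pyGetD ancs k [] with hold
        have holdv : old = ancs[k.toNat] :=
          PySem.List.pyGetD_eq_getElem ancs [] hk0 (by omega)
        set ancs' := PySem.List.pySetD ancs k (i :: old) with hancs'
        have hset : ancs' = ancs.set k.toNat (i :: old) := by
          rw [hancs', PySem.List.pySetD_of_nonneg ancs _ hk0]
        have hlen' : k.toNat < ancs'.length := by simp [hset, hklen]
        have H' : ∀ j : Nat, (j : Int) ≤ p → ancs'.getD j [] = [] := by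
          intro j hj
          have hjk : j ≠ k.toNat := by omega
          rw [hset]
          rw [List.getD, List.getElem?_set_ne (by omega : k.toNat ≠ j), ← List.getD]
          exact H j (by omega)
        rw [IH p ancs' (by omega) (by omega) hlen' H']
        have hchain : chain i = chain p ++ [i] := by rw [chain, dif_pos hi, ← hp]
        -- both sides are a single set on ancs
        rw [hset, PySem.List.pySetD_of_nonneg _ _ hk0, PySem.List.pySetD_of_nonneg _ _ hk0,
            List.set_set,
            PySem.List.pyGetD_eq_getElem (ancs.set k.toNat (i :: old)) [] hk0
              (by simp; omega),
            List.getElem_set_self (by simpa using hklen), hchain]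
        simp
      · rw [ancA_climb, dif_neg hi, chain, dif_neg hi, List.nil_append,
            PySem.List.pyGetD_eq_getElem ancs [] hk0 (by omega),
            PySem.List.pySetD_of_nonneg ancs _ hk0,
            List.set_getElem_self hklen]
  exact main (i + 1).toNat i ancs le_rfl hik hklen H

theorem alt_eq_map_path (n : Nat) : ancestor_idxs_alt (n : Int) = (List.range n).map path := by
  unfold ancestor_idxs_alt
  induction n with
  | zero => simp
  | succ m ih =>
    rw [show ((m + 1 : Nat) : Int) = (m : Int) + 1 by push_cast; ring,
        PySem.List.pyRange_one_succ_right (Int.natCast_nonneg m),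
        List.foldl_concat, ih, List.range_succ, List.map_append]
    match m with
    | 0 => simp [path]
    | s + 1 =>
      have hne : (((s + 1 : Nat) : Int) == 0) = false := by
        simp only [beq_eq_false_iff_ne]; push_cast; omega
      rw [hne]
      simp only [Bool.false_eq_true, if_false]
      rw [show ((s + 1 : Nat) : Int) - 1 = ((s : Nat) : Int) by push_cast; ring,
          show PySem.Int.floordiv ((s : Nat) : Int) 2 = ((s / 2 : Nat) : Int) from
            by exact_mod_cast PySem.Int.floordiv_natCast s 2,
          PySem.List.pyGetD_natCast,
          PySem.List.getD_map_range path (s + 1) (s / 2) [] (by omega)]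
      simp [path]

theorem stateAt_getD (m n j : Nat) :
    (stateAt m n).getD j [] = if j < n then (if j < m then [] else path j) else [] := by
  unfold stateAt
  rcases Nat.lt_or_ge j n with h | h
  · rw [List.getD_eq_getElem _ _ (by simpa using h)]
    simp [h]
  · rw [List.getD_eq_default _ _ (by simpa using h), if_neg (by omega)]

theorem step_state (m n : Nat) (h : m < n) :
    ancA_climb (m : Int) (m : Int) (stateAt (m + 1) n) = stateAt m n := by
  have hlen : ((m : Int)).toNat < (stateAt (m + 1) n).length := by
    simp [stateAt]; omega
  rw [climb_eq (m : Int) (m : Int) _ (Int.natCast_nonneg m) le_rfl hlen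
      (by
        intro j hj
        have hj' : j ≤ m := by exact_mod_cast hj
        rw [stateAt_getD]
        split_ifs <;> first | rfl | omega)]
  have hget : PySem.List.pyGetD (stateAt (m + 1) n) (m : Int) [] = [] := by
    rw [PySem.List.pyGetD_eq_getElem _ [] (Int.natCast_nonneg m) (by simpa [stateAt] using (by omega : m < n))]
    simp [stateAt]
  rw [hget, List.append_nil, chain_natCast,
      PySem.List.pySetD_of_nonneg _ _ (Int.natCast_nonneg m)]
  apply List.ext_getElem
  · simp [stateAt]
  · intro j h1 h2
    have hjn : j < n := by simpa [stateAt] using h2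
    rw [List.getElem_set]
    simp only [stateAt, List.getElem_map, List.getElem_range,
      Int.toNat_natCast]
    rcases eq_or_ne m j with rfl | hne
    · simp
    · rw [if_neg hne]
      split_ifs <;> first | rfl | omega

theorem a_eq_map_path (n : Nat) : ancestor_idxs (n : Int) = (List.range n).map path := by
  have hr : PySem.List.pyRange 0 (n : Int) 1 = (List.range n).map (fun j : Nat => (j : Int)) := by
    rw [PySem.List.pyRange_one]; simp
  have loop : ∀ m, m ≤ n →
      (((List.range m).map (fun j : Nat => (j : Int))).reverse).foldl
        (fun ancs k => ancA_climb k k ancs) (stateAt m n) = stateAt 0 n := by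
    intro m
    induction m with
    | zero => intro _; simp
    | succ m ih =>
      intro hm
      rw [List.range_succ, List.map_append, List.reverse_append]
      simp only [List.map_cons, List.map_nil, List.reverse_cons, List.reverse_nil,
        List.nil_append, List.singleton_append, List.foldl_cons]
      rw [step_state m n (by omega)]
      exact ih (by omega)
  unfold ancestor_idxs
  have hinit : (PySem.List.pyRange 0 (n : Int) 1).map (fun _ => ([] : List Int)) = stateAt n n := by
    rw [hr]
    unfold stateAt
    rw [List.map_map]
    apply List.map_congr_left
    intro j hj
    simp [List.mem_range.mp hj]
  rw [hinit, hr, loop n le_rfl]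
  unfold stateAt
  apply List.map_congr_left
  intro j hj
  simp

-- ===== VERDICT (by name: the statement is the Claim_ definition above) =====
theorem ancestor_idxs_spec : Claim_equal_ancestor_idxs := by
  intro length _
  unfold Spec_ancestor_idxs
  rcases Int.lt_or_le length 0 with h | h
  · unfold ancestor_idxs ancestor_idxs_alt
    rw [PySem.List.pyRange_one_eq_nil (by omega)]
    simp
  · obtain ⟨n, rfl⟩ : ∃ n : Nat, length = (n : Int) := ⟨length.toNat, (Int.toNat_of_nonneg h).symm⟩
    rw [a_eq_map_path, alt_eq_map_path]
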